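-- pv_equiv track=rewrite | github.com/pypi-data/pypi-mirror-366 | packages/klaude-code/klaude_code-0.1.19.tar.gz/klaude_code-0.1.19/src/klaudecode/utils/file_utils/string_operations.py | try_colorblind_compatible_match
-- ===== SOURCE A (Python) =====
-- from typing import Tuple
--
-- def try_colorblind_compatible_match(content: str, old_string: str) -> Tuple[bool, str]:
--     """
--     Handle model "colorblindness" issue where full tag names might be
--     misinterpreted as shortened versions.
--
--     Common patterns:
--     - <result> and </result> misinterpreted as <r> and </r>
--     - <output> and </output> misinterpreted as <o> and </o>
--     - <name> and </name> misinterpreted as <n> and </n>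
--     - etc.
--
--     This function attempts to find the intended string by expanding
--     shortened tags to their full versions.
--
--     Args:
--         content: The file content to search in
--         old_string: The original string that was not found
--
--     Returns:
--         Tuple of (found, corrected_string) where:
--         - found: True if a compatible match was found
--         - corrected_string: The corrected string that was actually found in content
--     """
--
--     # Define mapping of shortened tags to their full versions
--     tag_mappings = {
--         "<r>": "<result>",
--         "</r>": "</result>",
--         "<o>": "<output>",
--         "</o>": "</output>",
--         "<n>": "<name>",
--         "</n>": "</name>",
--         "<t>": "<type>",
--         "</t>": "</type>",
--         "<i>": "<input>",
--         "</i>": "</input>",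
--         "<d>": "<description>",
--         "</d>": "</description>",
--         "<c>": "<content>",
--         "</c>": "</content>",
--         "<f>": "<function>",
--         "</f>": "</function>",
--         "<m>": "<method>",
--         "</m>": "</method>",
--         "<p>": "<parameter>",
--         "</p>": "</parameter>",
--         "<v>": "<value>",
--         "</v>": "</value>",
--         "<s>": "<string>",
--         "</s>": "</string>",
--     }
--
--     # Check if old_string contains any shortened tags
--     has_shortened_tags = any(
--         short_tag in old_string for short_tag in tag_mappings.keys()
--     )
--
--     if not has_shortened_tags:
--         return False, old_string
--
--     # Try expanding all shortened tags to their full versions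
--     corrected_string = old_string
--     for short_tag, full_tag in tag_mappings.items():
--         corrected_string = corrected_string.replace(short_tag, full_tag)
--
--     # Check if the corrected string exists in content
--     if corrected_string in content:
--         return True, corrected_string
--
--     return False, old_string
-- ===== SOURCE B (Python) =====
-- from typing import Tuple
--
-- _FULL = {
--     "r": "result", "o": "output", "n": "name", "t": "type",
--     "i": "input", "d": "description", "c": "content", "f": "function",
--     "m": "method", "p": "parameter", "v": "value", "s": "string",
-- }
--
--
-- def try_colorblind_compatible_match(content: str, old_string: str) -> Tuple[bool, str]:
--     # Single left-to-right scan: expand every shortened tag (<x> or </x>,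
--     # x a key of _FULL) in place.  A substitution occurred iff the scan
--     # changed the string, which replaces the separate guard pass.
--     out = []
--     i = 0
--     n = len(old_string)
--     while i < n:
--         if old_string[i] == "<":
--             j = i + 1
--             closing = j < n and old_string[j] == "/"
--             if closing:
--                 j += 1
--             if j + 1 < n and old_string[j + 1] == ">" and old_string[j] in _FULL:
--                 full = _FULL[old_string[j]]
--                 out.append("</" + full + ">" if closing else "<" + full + ">")
--                 i = j + 2
--                 continue
--         out.append(old_string[i])
--         i += 1
--     corrected = "".join(out)
--     if corrected != old_string and corrected in content:
--         return True, corrected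
--     return False, old_string
-- ===== Notes on version B (the rewrite author's own statement) =====
-- stated objective: alternative
-- what changed: Replaces the 24 sequential whole-string str.replace passes plus a separate any()-guard pass by one left-to-right scan that expands each shortened tag in place, deriving the guard from whether the scan changed the string.
import Mathlib
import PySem

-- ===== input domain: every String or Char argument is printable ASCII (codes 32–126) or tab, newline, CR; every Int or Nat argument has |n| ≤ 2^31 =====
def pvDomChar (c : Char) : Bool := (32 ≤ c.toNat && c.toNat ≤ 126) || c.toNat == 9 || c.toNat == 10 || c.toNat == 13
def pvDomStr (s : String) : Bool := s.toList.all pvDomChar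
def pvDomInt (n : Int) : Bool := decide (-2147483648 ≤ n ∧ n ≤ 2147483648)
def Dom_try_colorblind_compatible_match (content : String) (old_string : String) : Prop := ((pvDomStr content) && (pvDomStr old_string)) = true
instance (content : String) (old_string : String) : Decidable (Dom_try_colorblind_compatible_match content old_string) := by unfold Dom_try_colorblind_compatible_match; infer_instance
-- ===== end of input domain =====

-- B replaces A's 24 sequential whole-string replace passes (plus the separate any() guard
-- pass) by ONE left-to-right scan that expands each shortened tag in place; the guard becomes
-- "the scan changed the string".  The theorem below proves the return values always agree.

-- ===== PORT A =====
def pvTagList : List (String × String) :=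
  [("<r>", "<result>"), ("</r>", "</result>"),
   ("<o>", "<output>"), ("</o>", "</output>"),
   ("<n>", "<name>"), ("</n>", "</name>"),
   ("<t>", "<type>"), ("</t>", "</type>"),
   ("<i>", "<input>"), ("</i>", "</input>"),
   ("<d>", "<description>"), ("</d>", "</description>"),
   ("<c>", "<content>"), ("</c>", "</content>"),
   ("<f>", "<function>"), ("</f>", "</function>"),
   ("<m>", "<method>"), ("</m>", "</method>"),
   ("<p>", "<parameter>"), ("</p>", "</parameter>"),
   ("<v>", "<value>"), ("</v>", "</value>"),
   ("<s>", "<string>"), ("</s>", "</string>")]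

def pvTagMappings : PySem.Dict String String := PySem.Dict.ofList pvTagList

def try_colorblind_compatible_match (content : String) (old_string : String) : Bool × String :=
  let tag_mappings := pvTagMappings
  let has_shortened_tags := tag_mappings.keys.any (fun short_tag => PySem.Str.isIn short_tag old_string)
  if ¬ has_shortened_tags then (false, old_string)
  else
    let corrected_string := tag_mappings.items.foldl
      (fun s kv => PySem.Str.replace s kv.1 kv.2) old_string
    if PySem.Str.isIn corrected_string content then (true, corrected_string)
    else (false, old_string)

-- ===== PORT B =====
-- Source B's _FULL dict (letter -> full tag name, without the angle brackets)
def pvFullTable : List (Char × List Char) :=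
  [('r', "result".toList), ('o', "output".toList), ('n', "name".toList),
   ('t', "type".toList), ('i', "input".toList), ('d', "description".toList),
   ('c', "content".toList), ('f', "function".toList), ('m', "method".toList),
   ('p', "parameter".toList), ('v', "value".toList), ('s', "string".toList)]

def pvFull (x : Char) : Option (List Char) :=
  (pvFullTable.find? (fun kv => kv.1 == x)).map (fun kv => kv.2)

-- Source B's single left-to-right scan: expand each shortened tag in place
def pvExpand : List Char → List Char
  | [] => []
  | '<' :: '/' :: x :: '>' :: t =>
    match pvFull x with
    | some f => '<' :: '/' :: (f ++ '>' :: pvExpand t)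
    | none => '<' :: pvExpand ('/' :: x :: '>' :: t)
  | '<' :: x :: '>' :: t =>
    match pvFull x with
    | some f => '<' :: (f ++ '>' :: pvExpand t)
    | none => '<' :: pvExpand (x :: '>' :: t)
  | c :: t => c :: pvExpand t

def try_colorblind_compatible_match_alt (content : String) (old_string : String) : Bool × String :=
  let corrected := String.ofList (pvExpand old_string.toList)
  if corrected ≠ old_string ∧ PySem.Str.isIn corrected content then (true, corrected)
  else (false, old_string)

-- ===== PRECONDITION & SPEC =====
def Spec_try_colorblind_compatible_match (content : String) (old_string : String) (out : Bool × String) : Prop := out = try_colorblind_compatible_match_alt content old_string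
instance (content : String) (old_string : String) (out : Bool × String) : Decidable (Spec_try_colorblind_compatible_match content old_string out) := by unfold Spec_try_colorblind_compatible_match; infer_instance

-- ===== CLAIM (what is proved, stated in full; the proofs are below) =====
def Claim_equal_try_colorblind_compatible_match : Prop := ∀ (content : String) (old_string : String), Dom_try_colorblind_compatible_match content old_string → Spec_try_colorblind_compatible_match content old_string (try_colorblind_compatible_match content old_string)

-- ===== LEMMAS AND PROOFS =====

-- basic recurrences for PySem.Chars.replace (accumulator/fuel elimination)
theorem go_acc (p f : List Char) : ∀ (fuel : Nat) (l acc : List Char),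
    PySem.Chars.replace.go p f fuel l acc = acc.reverse ++ PySem.Chars.replace.go p f fuel l [] := by
  intro fuel
  induction fuel with
  | zero => intro l acc; simp [PySem.Chars.replace.go]
  | succ n ih =>
    intro l acc
    cases l with
    | nil => simp [PySem.Chars.replace.go]
    | cons c t =>
      simp only [PySem.Chars.replace.go]
      split
      · rw [ih _ (f.reverse ++ acc), ih _ (f.reverse ++ [])]
        simp
      · rw [ih _ (c :: acc), ih _ [c]]
        simp

theorem go_fuel (p f : List Char) (hp : p ≠ []) : ∀ (f1 : Nat) (f2 : Nat) (l acc : List Char),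
    l.length ≤ f1 → l.length ≤ f2 →
    PySem.Chars.replace.go p f f1 l acc = PySem.Chars.replace.go p f f2 l acc := by
  intro f1
  induction f1 with
  | zero =>
    intro f2 l acc h1 h2
    have : l = [] := by cases l <;> simp_all
    subst this
    cases f2 <;> simp [PySem.Chars.replace.go]
  | succ n ih =>
    intro f2 l acc h1 h2
    cases l with
    | nil => cases f2 <;> simp [PySem.Chars.replace.go]
    | cons c t =>
      cases f2 with
      | zero => simp at h2
      | succ m =>
        simp only [PySem.Chars.replace.go]
        split
        · apply ih
          · have hplen : 1 ≤ p.length := by cases p <;> simp_all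
            have := List.length_drop (l := c :: t) (i := p.length)
            simp at h1 ⊢
            omega
          · have hplen : 1 ≤ p.length := by cases p <;> simp_all
            simp at h2 ⊢
            omega
        · apply ih <;> simp_all

theorem replace_nil (p f : List Char) (hp : p ≠ []) : PySem.Chars.replace [] p f = [] := by
  simp [PySem.Chars.replace, PySem.Chars.replace.go, hp]

theorem replace_prefix (p f s : List Char) (hp : p ≠ []) (h : p <+: s) :
    PySem.Chars.replace s p f = f ++ PySem.Chars.replace (s.drop p.length) p f := by
  cases s with
  | nil => simp_all
  | cons c t =>
    have hpe : p.isEmpty = false := by cases p <;> simp_all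
    have hpre : p.isPrefixOf (c :: t) = true := List.isPrefixOf_iff_prefix.mpr h
    simp only [PySem.Chars.replace, hpe, Bool.false_eq_true, if_false]
    conv_lhs => rw [show (c :: t).length = t.length + 1 from by simp]
    simp only [PySem.Chars.replace.go, hpre, if_true]
    rw [go_acc]
    have hplen : 1 ≤ p.length := by cases p <;> simp_all
    rw [go_fuel p f hp t.length ((c :: t).drop p.length).length ((c :: t).drop p.length) [] (by simp; omega) (le_refl _)]
    simp

theorem replace_cons (p f : List Char) (c : Char) (t : List Char) (hp : p ≠ [])
    (h : ¬ p <+: (c :: t)) :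
    PySem.Chars.replace (c :: t) p f = c :: PySem.Chars.replace t p f := by
  have hpe : p.isEmpty = false := by cases p <;> simp_all
  have hpre : p.isPrefixOf (c :: t) = false := by
    rw [Bool.eq_false_iff]; intro hh; exact h (List.isPrefixOf_iff_prefix.mp hh)
  simp only [PySem.Chars.replace, hpe, Bool.false_eq_true, if_false]
  conv_lhs => rw [show (c :: t).length = t.length + 1 from by simp]
  simp only [PySem.Chars.replace.go, hpre, Bool.false_eq_true, if_false]
  rw [go_acc]
  simp

-- step over a block w in which p matches nowhere
theorem replace_stepover (p f : List Char) (hp : p ≠ []) :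
    ∀ (w rest : List Char), (∀ i < w.length, ¬ p <+: (w.drop i ++ rest)) →
    PySem.Chars.replace (w ++ rest) p f = w ++ PySem.Chars.replace rest p f := by
  intro w
  induction w with
  | nil => intro rest h; simp
  | cons c w' ih =>
    intro rest h
    have h0 : ¬ p <+: (c :: (w' ++ rest)) := by
      have := h 0 (by simp)
      simpa using this
    rw [List.cons_append, replace_cons p f c (w' ++ rest) hp h0, ih rest]
    · simp
    · intro i hi
      have := h (i + 1) (by simp; omega)
      simpa using this

-- prefix status of a '<'-free pattern is untouched by one replace pass
theorem pres (p f : List Char) (hp : p.head? = some '<') (hf : f.head? = some '<') :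
    ∀ (n : Nat) (t : List Char), t.length ≤ n → ∀ (τ : List Char), '<' ∉ τ →
    (τ <+: PySem.Chars.replace t p f ↔ τ <+: t) := by
  have hpne : p ≠ [] := by cases p <;> simp_all
  intro n
  induction n with
  | zero =>
    intro t ht τ hτ
    have : t = [] := by cases t <;> simp_all
    subst this
    rw [replace_nil p f hpne]
  | succ n ih =>
    intro t ht τ hτ
    cases t with
    | nil => rw [replace_nil p f hpne]
    | cons c t' =>
      by_cases hpp : p <+: (c :: t')
      · rw [replace_prefix p f _ hpne hpp]
        obtain ⟨u, hu⟩ := hpp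
        constructor
        · intro hcon
          cases τ with
          | nil => exact List.nil_prefix
          | cons x τ' =>
            exfalso
            obtain ⟨pp, hpeq⟩ : ∃ pp, f = '<' :: pp := by cases f <;> simp_all
            rw [hpeq] at hcon
            simp only [List.cons_append, List.cons_prefix_cons] at hcon
            exact hτ (by simp [hcon.1])
        · intro hcon
          cases τ with
          | nil => exact List.nil_prefix
          | cons x τ' =>
            exfalso
            obtain ⟨pp, hpeq⟩ : ∃ pp, p = '<' :: pp := by cases p <;> simp_all
            rw [← hu, hpeq] at hcon
            simp only [List.cons_append, List.cons_prefix_cons] at hcon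
            exact hτ (by simp [hcon.1])
      · rw [replace_cons p f c t' hpne hpp]
        cases τ with
        | nil => simp
        | cons x τ' =>
          simp only [List.cons_prefix_cons]
          constructor
          · rintro ⟨rfl, hh⟩
            exact ⟨rfl, (ih t' (by simp at ht; omega) τ' (by simp_all)).mp hh⟩
          · rintro ⟨rfl, hh⟩
            exact ⟨rfl, (ih t' (by simp at ht; omega) τ' (by simp_all)).mpr hh⟩
-- A's tag table on the List-Char level
def ctags : List (List Char × List Char) :=
  [(['<', 'r', '>'], ['<', 'r', 'e', 's', 'u', 'l', 't', '>']),
   (['<', '/', 'r', '>'], ['<', '/', 'r', 'e', 's', 'u', 'l', 't', '>']),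
   (['<', 'o', '>'], ['<', 'o', 'u', 't', 'p', 'u', 't', '>']),
   (['<', '/', 'o', '>'], ['<', '/', 'o', 'u', 't', 'p', 'u', 't', '>']),
   (['<', 'n', '>'], ['<', 'n', 'a', 'm', 'e', '>']),
   (['<', '/', 'n', '>'], ['<', '/', 'n', 'a', 'm', 'e', '>']),
   (['<', 't', '>'], ['<', 't', 'y', 'p', 'e', '>']),
   (['<', '/', 't', '>'], ['<', '/', 't', 'y', 'p', 'e', '>']),
   (['<', 'i', '>'], ['<', 'i', 'n', 'p', 'u', 't', '>']),
   (['<', '/', 'i', '>'], ['<', '/', 'i', 'n', 'p', 'u', 't', '>']),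
   (['<', 'd', '>'], ['<', 'd', 'e', 's', 'c', 'r', 'i', 'p', 't', 'i', 'o', 'n', '>']),
   (['<', '/', 'd', '>'], ['<', '/', 'd', 'e', 's', 'c', 'r', 'i', 'p', 't', 'i', 'o', 'n', '>']),
   (['<', 'c', '>'], ['<', 'c', 'o', 'n', 't', 'e', 'n', 't', '>']),
   (['<', '/', 'c', '>'], ['<', '/', 'c', 'o', 'n', 't', 'e', 'n', 't', '>']),
   (['<', 'f', '>'], ['<', 'f', 'u', 'n', 'c', 't', 'i', 'o', 'n', '>']),
   (['<', '/', 'f', '>'], ['<', '/', 'f', 'u', 'n', 'c', 't', 'i', 'o', 'n', '>']),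
   (['<', 'm', '>'], ['<', 'm', 'e', 't', 'h', 'o', 'd', '>']),
   (['<', '/', 'm', '>'], ['<', '/', 'm', 'e', 't', 'h', 'o', 'd', '>']),
   (['<', 'p', '>'], ['<', 'p', 'a', 'r', 'a', 'm', 'e', 't', 'e', 'r', '>']),
   (['<', '/', 'p', '>'], ['<', '/', 'p', 'a', 'r', 'a', 'm', 'e', 't', 'e', 'r', '>']),
   (['<', 'v', '>'], ['<', 'v', 'a', 'l', 'u', 'e', '>']),
   (['<', '/', 'v', '>'], ['<', '/', 'v', 'a', 'l', 'u', 'e', '>']),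
   (['<', 's', '>'], ['<', 's', 't', 'r', 'i', 'n', 'g', '>']),
   (['<', '/', 's', '>'], ['<', '/', 's', 't', 'r', 'i', 'n', 'g', '>'])]

-- "some shortened tag matches at the head of s"
def pvHm (s : List Char) : Prop := ∃ pf ∈ ctags, pf.1 <+: s

theorem ctags_spec : ∀ pf ∈ ctags,
    pf.1.head? = some '<' ∧ pf.2.head? = some '<' ∧
    '<' ∉ pf.1.drop 1 ∧ '<' ∉ pf.2.drop 1 ∧
    3 ≤ pf.1.length ∧ pf.1.length ≤ 4 ∧ 6 ≤ pf.2.length ∧ pf.1.length < pf.2.length := by decide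

theorem ctags_key_inj : ∀ pf ∈ ctags, ∀ qg ∈ ctags, pf.1 = qg.1 → pf = qg := by decide

theorem ctags_take : ∀ pf ∈ ctags, ∀ qg ∈ ctags, pf.1 = qg.1 ∨
    pf.1.take (min pf.1.length qg.1.length) ≠ qg.1.take (min pf.1.length qg.1.length) := by decide

theorem ctags_key_full : ∀ pf ∈ ctags, ∀ qg ∈ ctags, pf.1 ≠ qg.2.take pf.1.length := by decide

theorem ctags_nodup : ctags.Nodup := by decide


theorem take_of_prefix {p x : List Char} (h : p <+: x) {k : Nat} (hk : k ≤ p.length) :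
    x.take k = p.take k := by
  obtain ⟨u, rfl⟩ := h
  rw [List.take_append_of_le_length hk]

theorem not_prefix_key {pf qg : List Char × List Char} (hpf : pf ∈ ctags) (hqg : qg ∈ ctags)
    (hne : pf.1 ≠ qg.1) (rest : List Char) : ¬ pf.1 <+: (qg.1 ++ rest) := by
  intro h
  rcases ctags_take pf hpf qg hqg with heq | htk
  · exact hne heq
  apply htk
  have h1 : (qg.1 ++ rest).take (min pf.1.length qg.1.length) = pf.1.take (min pf.1.length qg.1.length) :=
    take_of_prefix h (by omega)
  rw [List.take_append_of_le_length (by omega)] at h1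
  exact h1.symm

theorem not_prefix_mid {p : List Char} (hp : p.head? = some '<') {w : List Char}
    (hw : '<' ∉ w.drop 1) {i : Nat} (h0 : 0 < i) (hi : i < w.length) (rest : List Char) :
    ¬ p <+: (w.drop i ++ rest) := by
  intro h
  obtain ⟨pp, rfl⟩ : ∃ pp, p = '<' :: pp := by cases p <;> simp_all
  have hne : w.drop i ≠ [] := by
    intro hnil
    rw [List.drop_eq_nil_iff] at hnil
    omega
  obtain ⟨c, u, hcu⟩ := List.exists_cons_of_ne_nil hne
  rw [hcu] at h
  simp only [List.cons_append, List.cons_prefix_cons] at h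
  have hcmem : c ∈ w.drop 1 := by
    have : c ∈ w.drop i := by rw [hcu]; simp
    have hsub : w.drop i = (w.drop 1).drop (i - 1) := by
      rw [List.drop_drop]; congr 1; omega
    rw [hsub] at this
    exact List.mem_of_mem_drop this
  rw [← h.1] at hcmem
  exact hw hcmem

theorem not_prefix_full {pf qg : List Char × List Char} (hpf : pf ∈ ctags) (hqg : qg ∈ ctags)
    (rest : List Char) : ¬ pf.1 <+: (qg.2 ++ rest) := by
  intro h
  have hlen : pf.1.length ≤ qg.2.length := by
    have h1 := (ctags_spec pf hpf).2.2.2.2.2.1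
    have h2 := (ctags_spec qg hqg).2.2.2.2.2.2.1
    omega
  have h1 : (qg.2 ++ rest).take pf.1.length = pf.1.take pf.1.length := take_of_prefix h (le_refl _)
  rw [List.take_append_of_le_length hlen, List.take_length] at h1
  exact ctags_key_full pf hpf qg hqg h1.symm

-- single replace steps over another tag's key
theorem so_key {pf qg : List Char × List Char} (hpf : pf ∈ ctags) (hqg : qg ∈ ctags)
    (hne : pf.1 ≠ qg.1) (rest : List Char) :
    PySem.Chars.replace (qg.1 ++ rest) pf.1 pf.2 = qg.1 ++ PySem.Chars.replace rest pf.1 pf.2 := by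
  have hp : pf.1.head? = some '<' := (ctags_spec pf hpf).1
  apply replace_stepover pf.1 pf.2 (by cases hpq : pf.1 <;> simp_all)
  intro i hi
  rcases Nat.eq_zero_or_pos i with rfl | hpos
  · simpa using not_prefix_key hpf hqg hne rest
  · exact not_prefix_mid hp (ctags_spec qg hqg).2.2.1 hpos hi rest

-- single replace steps over any full tag
theorem so_full {pf qg : List Char × List Char} (hpf : pf ∈ ctags) (hqg : qg ∈ ctags)
    (rest : List Char) :
    PySem.Chars.replace (qg.2 ++ rest) pf.1 pf.2 = qg.2 ++ PySem.Chars.replace rest pf.1 pf.2 := by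
  have hp : pf.1.head? = some '<' := (ctags_spec pf hpf).1
  apply replace_stepover pf.1 pf.2 (by cases hpq : pf.1 <;> simp_all)
  intro i hi
  rcases Nat.eq_zero_or_pos i with rfl | hpos
  · simpa using not_prefix_full hpf hqg rest
  · exact not_prefix_mid hp (ctags_spec qg hqg).2.2.2.1 hpos hi rest

def pvRep (s : List Char) (pf : List Char × List Char) : List Char :=
  PySem.Chars.replace s pf.1 pf.2

theorem foldl_step_key {L : List (List Char × List Char)} (hL : ∀ x ∈ L, x ∈ ctags)
    {qg : List Char × List Char} (hqg : qg ∈ ctags) (hne : ∀ pf ∈ L, pf.1 ≠ qg.1)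
    (rest : List Char) :
    L.foldl pvRep (qg.1 ++ rest) = qg.1 ++ L.foldl pvRep rest := by
  induction L generalizing rest with
  | nil => simp
  | cons pf L' ih =>
    simp only [List.foldl_cons]
    rw [show pvRep (qg.1 ++ rest) pf = qg.1 ++ pvRep rest pf from
      so_key (hL pf (by simp)) hqg (hne pf (by simp)) rest]
    exact ih (fun x hx => hL x (by simp [hx])) (fun x hx => hne x (by simp [hx])) _

theorem foldl_step_full {L : List (List Char × List Char)} (hL : ∀ x ∈ L, x ∈ ctags)
    {qg : List Char × List Char} (hqg : qg ∈ ctags) (rest : List Char) :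
    L.foldl pvRep (qg.2 ++ rest) = qg.2 ++ L.foldl pvRep rest := by
  induction L generalizing rest with
  | nil => simp
  | cons pf L' ih =>
    simp only [List.foldl_cons]
    rw [show pvRep (qg.2 ++ rest) pf = qg.2 ++ pvRep rest pf from
      so_full (hL pf (by simp)) hqg rest]
    exact ih (fun x hx => hL x (by simp [hx])) _

def pvChain (s : List Char) : List Char := ctags.foldl pvRep s

theorem foldl_nil {L : List (List Char × List Char)} (hL : ∀ x ∈ L, x ∈ ctags) :
    L.foldl pvRep [] = [] := by
  induction L with
  | nil => rfl
  | cons pf L' ih =>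
    simp only [List.foldl_cons]
    rw [show pvRep [] pf = [] from replace_nil _ _ (by
      have := (ctags_spec pf (hL pf (by simp))).1
      cases h : pf.1 <;> simp_all)]
    exact ih (fun x hx => hL x (by simp [hx]))

theorem chain_match {pf : List Char × List Char} (hpf : pf ∈ ctags) (rest : List Char) :
    pvChain (pf.1 ++ rest) = pf.2 ++ pvChain rest := by
  obtain ⟨L₁, L₂, hsplit⟩ := List.append_of_mem hpf
  have hnodup := ctags_nodup
  rw [hsplit] at hnodup
  have hnotmem : pf ∉ L₁ := by
    rw [List.nodup_append] at hnodup
    exact fun hmem => hnodup.2.2 pf hmem pf (by simp) rfl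
  have hL₁ : ∀ x ∈ L₁, x ∈ ctags := by intro x hx; rw [hsplit]; simp [hx]
  have hL₂ : ∀ x ∈ L₂, x ∈ ctags := by intro x hx; rw [hsplit]; simp [hx]
  have hne : ∀ qg ∈ L₁, qg.1 ≠ pf.1 := by
    intro qg hqg heq
    exact hnotmem (by rw [← ctags_key_inj qg (hL₁ qg hqg) pf hpf heq]; exact hqg)
  have hpne : pf.1 ≠ [] := by
    have := (ctags_spec pf hpf).1
    cases h : pf.1 <;> simp_all
  unfold pvChain
  rw [hsplit, List.foldl_append, List.foldl_append]
  rw [foldl_step_key hL₁ hpf hne rest]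
  simp only [List.foldl_cons]
  rw [show pvRep (pf.1 ++ L₁.foldl pvRep rest) pf = pf.2 ++ pvRep (L₁.foldl pvRep rest) pf from by
    unfold pvRep
    rw [replace_prefix pf.1 pf.2 _ hpne (List.prefix_append _ _), List.drop_left]]
  have : pvRep (L₁.foldl pvRep rest) pf = (L₁ ++ [pf]).foldl pvRep rest := by
    rw [List.foldl_append]; rfl
  rw [this, foldl_step_full hL₂ hpf]

theorem hm_cons_ne {c : Char} (hc : c ≠ '<') (u : List Char) : ¬ pvHm (c :: u) := by
  rintro ⟨qg, hqg, hpre⟩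
  obtain ⟨pp, hq⟩ : ∃ pp, qg.1 = '<' :: pp := by
    have := (ctags_spec qg hqg).1
    cases h : qg.1 <;> simp_all
  rw [hq] at hpre
  simp only [List.cons_prefix_cons] at hpre
  exact hc hpre.1.symm

theorem tau {pf : List Char × List Char} (hpf : pf ∈ ctags) (t : List Char) :
    pvHm ('<' :: PySem.Chars.replace t pf.1 pf.2) ↔ pvHm ('<' :: t) := by
  have hp : pf.1.head? = some '<' := (ctags_spec pf hpf).1
  have hf : pf.2.head? = some '<' := (ctags_spec pf hpf).2.1
  constructor <;> rintro ⟨qg, hqg, hpre⟩ <;> refine ⟨qg, hqg, ?_⟩ <;>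
  · obtain ⟨τ, hq⟩ : ∃ τ, qg.1 = '<' :: τ := by
      have := (ctags_spec qg hqg).1
      cases h : qg.1 <;> simp_all
    have hτ : '<' ∉ τ := by
      have := (ctags_spec qg hqg).2.2.1
      rw [hq] at this
      simpa using this
    rw [hq] at hpre ⊢
    simp only [List.cons_prefix_cons] at hpre ⊢
    refine ⟨by trivial, ?_⟩
    first
      | exact (pres pf.1 pf.2 hp hf t.length t (le_refl _) τ hτ).mp hpre.2
      | exact (pres pf.1 pf.2 hp hf t.length t (le_refl _) τ hτ).mpr hpre.2

theorem foldl_nomatch {L : List (List Char × List Char)} (hL : ∀ x ∈ L, x ∈ ctags)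
    {c : Char} {t : List Char} (h : ¬ pvHm (c :: t)) :
    L.foldl pvRep (c :: t) = c :: L.foldl pvRep t := by
  induction L generalizing t with
  | nil => simp
  | cons pf L' ih =>
    have hpf := hL pf (by simp)
    have hpne : pf.1 ≠ [] := by
      have := (ctags_spec pf hpf).1
      cases hq : pf.1 <;> simp_all
    have hnp : ¬ pf.1 <+: (c :: t) := fun hpre => h ⟨pf, hpf, hpre⟩
    simp only [List.foldl_cons]
    rw [show pvRep (c :: t) pf = c :: PySem.Chars.replace t pf.1 pf.2 from
      replace_cons pf.1 pf.2 c t hpne hnp]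
    have h' : ¬ pvHm (c :: PySem.Chars.replace t pf.1 pf.2) := by
      by_cases hc : c = '<'
      · subst hc; exact fun hh => h ((tau hpf t).mp hh)
      · exact hm_cons_ne hc _
    exact ih (fun x hx => hL x (by simp [hx])) h'

theorem table_open : ∀ kv ∈ pvFullTable, (('<' :: kv.1 :: ['>']), ('<' :: (kv.2 ++ ['>']))) ∈ ctags := by decide
theorem table_close : ∀ kv ∈ pvFullTable, (('<' :: '/' :: kv.1 :: ['>']), ('<' :: '/' :: (kv.2 ++ ['>']))) ∈ ctags := by decide
theorem pvFull_some {x : Char} {f : List Char} (h : pvFull x = some f) : (x, f) ∈ pvFullTable := by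
  unfold pvFull at h
  cases hfind : pvFullTable.find? (fun kv => kv.1 == x) with
  | none => rw [hfind] at h; simp at h
  | some kv =>
    rw [hfind] at h
    simp at h
    have hmem := List.mem_of_find?_eq_some hfind
    have hbeq := List.find?_some hfind
    simp at hbeq
    rw [← hbeq, ← h]
    exact hmem

theorem exp_match : ∀ pf ∈ ctags, ∀ rest, pvExpand (pf.1 ++ rest) = pf.2 ++ pvExpand rest := by
  intro pf hpf rest
  fin_cases hpf <;> simp [pvExpand, pvFull, pvFullTable]

theorem exp_nomatch {c : Char} {t : List Char} (h : ¬ pvHm (c :: t)) :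
    pvExpand (c :: t) = c :: pvExpand t := by
  rw [pvExpand.eq_def]
  split
  case h_1 heq => simp at heq
  case h_2 x t2 heq =>
    cases hfx : pvFull x with
    | some f =>
      exfalso
      apply h
      refine ⟨(['<', '/', x, '>'], '<' :: '/' :: (f ++ ['>'])), ?_, ?_⟩
      · simpa using table_close (x, f) (pvFull_some hfx)
      · rw [show c :: t = '<' :: '/' :: x :: '>' :: t2 from heq]
        exact ⟨t2, rfl⟩
    | none =>
      simp only [List.cons.injEq] at heq
      obtain ⟨rfl, rfl⟩ := heq
      simp
  case h_3 x t2 hnot heq =>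
    cases hfx : pvFull x with
    | some f =>
      exfalso
      apply h
      refine ⟨(['<', x, '>'], '<' :: (f ++ ['>'])), ?_, ?_⟩
      · simpa using table_open (x, f) (pvFull_some hfx)
      · rw [show c :: t = '<' :: x :: '>' :: t2 from heq]
        exact ⟨t2, rfl⟩
    | none =>
      simp only [List.cons.injEq] at heq
      obtain ⟨rfl, rfl⟩ := heq
      simp
  case h_4 c2 t2 h1 h2 heq =>
    simp only [List.cons.injEq] at heq
    obtain ⟨rfl, rfl⟩ := heq
    rfl

theorem chain_expand : ∀ (n : Nat) (t : List Char), t.length ≤ n → pvChain t = pvExpand t := by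
  intro n
  induction n with
  | zero =>
    intro t ht
    have : t = [] := by cases t <;> simp_all
    subst this
    exact foldl_nil (fun x hx => hx)
  | succ n ih =>
    intro t ht
    by_cases hhm : pvHm t
    · obtain ⟨pf, hpf, u, rfl⟩ := hhm
      rw [chain_match hpf, exp_match pf hpf]
      have h3 : 3 ≤ pf.1.length := (ctags_spec pf hpf).2.2.2.2.1
      rw [ih u (by simp at ht; omega)]
    · cases t with
      | nil => exact foldl_nil (fun x hx => hx)
      | cons c t' =>
        rw [show pvChain (c :: t') = c :: pvChain t' from foldl_nomatch (fun x hx => hx) hhm,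
          exp_nomatch hhm, ih t' (by simp at ht; omega)]

theorem expand_len : ∀ (n : Nat) (t : List Char), t.length ≤ n → t.length ≤ (pvExpand t).length := by
  intro n
  induction n with
  | zero => intro t ht; omega
  | succ n ih =>
    intro t ht
    by_cases hhm : pvHm t
    · obtain ⟨pf, hpf, u, rfl⟩ := hhm
      rw [exp_match pf hpf]
      have h3 : 3 ≤ pf.1.length := (ctags_spec pf hpf).2.2.2.2.1
      have hlt : pf.1.length < pf.2.length := (ctags_spec pf hpf).2.2.2.2.2.2.2
      have := ih u (by simp at ht; omega)
      simp at ht ⊢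
      omega
    · cases t with
      | nil => simp
      | cons c t' =>
        rw [exp_nomatch hhm]
        have := ih t' (by simp at ht; omega)
        simp
        omega

theorem expand_strict : ∀ (n : Nat) (t : List Char), t.length ≤ n →
    (∃ pf ∈ ctags, pf.1 <:+: t) → t.length < (pvExpand t).length := by
  intro n
  induction n with
  | zero =>
    intro t ht ⟨pf, hpf, hinf⟩
    have : t = [] := by cases t <;> simp_all
    subst this
    have h3 : 3 ≤ pf.1.length := (ctags_spec pf hpf).2.2.2.2.1
    have hnil : pf.1 = [] := List.eq_nil_of_infix_nil hinf
    rw [hnil] at h3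
    simp at h3
  | succ n ih =>
    intro t ht hex
    by_cases hhm : pvHm t
    · obtain ⟨pf, hpf, u, rfl⟩ := hhm
      rw [exp_match pf hpf]
      have h3 : 3 ≤ pf.1.length := (ctags_spec pf hpf).2.2.2.2.1
      have hlt : pf.1.length < pf.2.length := (ctags_spec pf hpf).2.2.2.2.2.2.2
      have := expand_len u.length u (le_refl _)
      simp at ht ⊢
      omega
    · cases t with
      | nil =>
        obtain ⟨pf, hpf, hinf⟩ := hex
        have h3 : 3 ≤ pf.1.length := (ctags_spec pf hpf).2.2.2.2.1
        have hnil : pf.1 = [] := List.eq_nil_of_infix_nil hinf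
        rw [hnil] at h3
        simp at h3
      | cons c t' =>
        rw [exp_nomatch hhm]
        obtain ⟨pf, hpf, hinf⟩ := hex
        rcases List.infix_cons_iff.mp hinf with hpre | hinf'
        · exact absurd ⟨pf, hpf, hpre⟩ hhm
        · have := ih t' (by simp at ht; omega) ⟨pf, hpf, hinf'⟩
          simp
          omega

theorem expand_id {t : List Char} (h : ¬ ∃ pf ∈ ctags, pf.1 <:+: t) : pvExpand t = t := by
  induction t with
  | nil => rfl
  | cons c t' ih =>
    have hhm : ¬ pvHm (c :: t') := by
      rintro ⟨pf, hpf, hpre⟩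
      exact h ⟨pf, hpf, hpre.isInfix⟩
    rw [exp_nomatch hhm, ih]
    intro ⟨pf, hpf, hinf⟩
    exact h ⟨pf, hpf, hinf.trans (List.suffix_cons c t').isInfix⟩

theorem dict_items : pvTagMappings.items = pvTagList := by decide
theorem dict_keys : pvTagMappings.keys = pvTagList.map Prod.fst := by decide
theorem taglist_ctags : pvTagList.map (fun kv => (kv.1.toList, kv.2.toList)) = ctags := by decide

theorem fold_str : ∀ (L : List (String × String)) (s : String),
    (L.foldl (fun s kv => PySem.Str.replace s kv.1 kv.2) s).toList
      = (L.map (fun kv => (kv.1.toList, kv.2.toList))).foldl pvRep s.toList := by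
  intro L
  induction L with
  | nil => intro s; rfl
  | cons kv L' ih =>
    intro s
    simp only [List.foldl_cons, List.map_cons]
    rw [ih]
    congr 1
    simp [pvRep, PySem.Str.toList_replace]

theorem has_iff (old : String) :
    (pvTagMappings.keys.any (fun short_tag => PySem.Str.isIn short_tag old) = true)
      ↔ ∃ pf ∈ ctags, pf.1 <:+: old.toList := by
  rw [dict_keys, List.any_eq_true]
  constructor
  · rintro ⟨x, hx, hin⟩
    obtain ⟨kv, hkv, rfl⟩ := List.mem_map.mp hx
    refine ⟨(kv.1.toList, kv.2.toList), ?_, ?_⟩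
    · rw [← taglist_ctags]; exact List.mem_map_of_mem hkv
    · exact (PySem.Str.isIn_iff_infix _ _).mp hin
  · rintro ⟨pf, hpf, hinf⟩
    rw [← taglist_ctags] at hpf
    obtain ⟨kv, hkv, rfl⟩ := List.mem_map.mp hpf
    refine ⟨kv.1, List.mem_map_of_mem hkv, ?_⟩
    exact (PySem.Str.isIn_iff_infix _ _).mpr hinf


theorem pvPortsAgree : ∀ (content old_string : String),
    try_colorblind_compatible_match content old_string
      = try_colorblind_compatible_match_alt content old_string := by
  intro content old
  unfold try_colorblind_compatible_match try_colorblind_compatible_match_alt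
  by_cases hHas : ∃ pf ∈ ctags, pf.1 <:+: old.toList
  · have hbool := (has_iff old).mpr hHas
    have hAB : (pvTagList.foldl
        (fun s kv => PySem.Str.replace s kv.1 kv.2) old) = String.ofList (pvExpand old.toList) := by
      apply String.toList_inj.mp
      rw [fold_str, taglist_ctags, String.toList_ofList]
      exact chain_expand old.toList.length old.toList (le_refl _)
    have hne : String.ofList (pvExpand old.toList) ≠ old := by
      intro heq
      have hstrict := expand_strict old.toList.length old.toList (le_refl _) hHas
      have hlen : (pvExpand old.toList).length = old.toList.length := by
        rw [← @String.toList_ofList (pvExpand old.toList), heq]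
      omega
    simp only [dict_items, hbool, hAB]
    simp [hne]
  · have hb2 : (pvTagMappings.keys.any (fun short_tag => PySem.Str.isIn short_tag old)) = false := by
      rw [Bool.eq_false_iff]
      intro hh
      exact hHas ((has_iff old).mp hh)
    have hid : pvExpand old.toList = old.toList := expand_id hHas
    simp only [hb2, hid, String.ofList_toList]
    simp

-- ===== VERDICT (by name: the statement is the Claim_ definition above) =====
theorem try_colorblind_compatible_match_spec : Claim_equal_try_colorblind_compatible_match := by
  unfold Claim_equal_try_colorblind_compatible_match
  intro content old_string _
  unfold Spec_try_colorblind_compatible_match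
  exact pvPortsAgree content old_string
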